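-- pv_equiv track=rewrite | github.com/ldg1036/AI_TF_CODEREVIEW | tools/perf/http_perf_baseline.py | _bool_values_csv
-- ===== SOURCE A (Python) =====
-- from typing import Any, Dict, Iterable, List, Optional, Sequence, Tuple
--
-- def _bool_values_csv(raw: str) -> List[bool]:
--     out: List[bool] = []
--     for part in (raw or "").split(","):
--         token = part.strip().lower()
--         if not token:
--             continue
--         if token in ("1", "true", "t", "yes", "y", "on"):
--             out.append(True)
--         elif token in ("0", "false", "f", "no", "n", "off"):
--             out.append(False)
--         else:
--             raise ValueError(f"Invalid boolean token: {part!r}")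
--     # dedupe while preserving order
--     deduped: List[bool] = []
--     for item in out:
--         if item not in deduped:
--             deduped.append(item)
--     return deduped or [False]
-- ===== SOURCE B (Python) =====
-- from typing import List
--
-- _TRUE = frozenset(("1", "true", "t", "yes", "y", "on"))
-- _FALSE = frozenset(("0", "false", "f", "no", "n", "off"))
--
--
-- def _bool_values_csv(raw: str) -> List[bool]:
--     # no dedupe pass at all: validate, map tokens to bools, then build the result
--     # in closed form from the first-occurrence indices of True and False
--     parts = (raw or "").split(",")
--     for part in parts:
--         token = part.strip().lower()
--         if token and token not in _TRUE and token not in _FALSE: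
--             raise ValueError(f"Invalid boolean token: {part!r}")
--     vals = [t in _TRUE for t in (p.strip().lower() for p in parts) if t]
--     try:
--         i = vals.index(True)
--     except ValueError:
--         return [False]          # no True anywhere (covers the empty case too)
--     try:
--         j = vals.index(False)
--     except ValueError:
--         return [True]           # no False anywhere
--     return [True, False] if i < j else [False, True]
-- ===== Notes on version B (the rewrite author's own statement) =====
-- stated objective: alternative
-- what changed: B drops A's incremental dedupe pass entirely: it validates the tokens, maps them to a boolean list, and then builds the result in closed form from the first-occurrence indices of True and False (list.index), exploiting that the deduped output of a boolean list is fully determined by which value appears first.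
import Mathlib
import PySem

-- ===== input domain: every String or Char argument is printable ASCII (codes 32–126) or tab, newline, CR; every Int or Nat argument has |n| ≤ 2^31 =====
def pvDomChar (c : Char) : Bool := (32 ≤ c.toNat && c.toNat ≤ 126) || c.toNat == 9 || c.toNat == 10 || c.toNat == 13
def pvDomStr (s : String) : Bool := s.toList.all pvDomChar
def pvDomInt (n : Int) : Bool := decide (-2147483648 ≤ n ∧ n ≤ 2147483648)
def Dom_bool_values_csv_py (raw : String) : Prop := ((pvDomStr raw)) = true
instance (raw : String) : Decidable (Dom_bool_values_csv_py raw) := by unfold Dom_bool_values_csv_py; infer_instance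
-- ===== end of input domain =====

-- B replaces A's per-element dedupe pass by a closed-form result computed from the first-occurrence
-- indices of True and False in the parsed boolean list (alternative decomposition; return value only).


-- shared helpers: raw.split(",") and token = part.strip().lower()
def pvParts (raw : String) : List String := (PySem.Str.split? raw ",").getD []
def pvTok (part : String) : String := PySem.Str.lower (PySem.Str.strip part)

def pvTrueToks : List String := ["1", "true", "t", "yes", "y", "on"]
def pvFalseToks : List String := ["0", "false", "f", "no", "n", "off"]

-- ===== PORT A =====
-- one iteration of A's parse loop; `none` = the ValueError branch
def pvAStep (acc : Option (List Bool)) (part : String) : Option (List Bool) :=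
  match acc with
  | none => none
  | some out =>
    let token := pvTok part
    if token = "" then some out
    else if token ∈ pvTrueToks then some (out ++ [true])
    else if token ∈ pvFalseToks then some (out ++ [false])
    else none

def pvDedupStep (d : List Bool) (item : Bool) : List Bool :=
  if item ∈ d then d else d ++ [item]

def bool_values_csv_py (raw : String) : List Bool :=
  match (pvParts raw).foldl pvAStep (some []) with
  | none => []  -- A raises ValueError here; excluded by Pre_
  | some out =>
    let deduped := out.foldl pvDedupStep []
    if deduped = [] then [false] else deduped

-- ===== PORT B =====
def bool_values_csv_py_alt (raw : String) : List Bool :=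
  let parts := pvParts raw
  -- validation scan (the for-loop that raises on an invalid token)
  if parts.any (fun p =>
      let t := pvTok p
      t ≠ "" && !(t ∈ pvTrueToks) && !(t ∈ pvFalseToks)) then
    []  -- B raises ValueError here; excluded by Pre_
  else
    -- vals = [t in _TRUE for t in (...) if t]
    let vals := parts.filterMap (fun p =>
      let t := pvTok p
      if t = "" then none else some (decide (t ∈ pvTrueToks)))
    -- closed form from the first-occurrence indices
    match PySem.List.index? vals true with
    | none => [false]
    | some i =>
      match PySem.List.index? vals false with
      | none => [true]
      | some j => if i < j then [true, false] else [false, true]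

-- ===== PRECONDITION & SPEC =====
-- Pre_ excludes exactly the inputs containing an invalid boolean token, on which A raises ValueError.
def Pre_bool_values_csv_py (raw : String) : Prop :=
  ∀ part ∈ pvParts raw,
    pvTok part = "" ∨
    pvTok part ∈ ["1", "true", "t", "yes", "y", "on", "0", "false", "f", "no", "n", "off"]
instance (raw : String) : Decidable (Pre_bool_values_csv_py raw) := by
  unfold Pre_bool_values_csv_py; infer_instance

def pvWitness_bool_values_csv_py : String := "1, NO ,true,,off"

def Spec_bool_values_csv_py (raw : String) (out : List Bool) : Prop := out = bool_values_csv_py_alt raw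
instance (raw : String) (out : List Bool) : Decidable (Spec_bool_values_csv_py raw out) := by
  unfold Spec_bool_values_csv_py; infer_instance

-- ===== CLAIM =====
def Claim_equal_bool_values_csv_py : Prop :=
  ∀ (raw : String), Dom_bool_values_csv_py raw → Pre_bool_values_csv_py raw →
    Spec_bool_values_csv_py raw (bool_values_csv_py raw)

-- ===== LEMMAS AND PROOFS =====
def pvValid (part : String) : Prop :=
  pvTok part = "" ∨ pvTok part ∈ pvTrueToks ∨ pvTok part ∈ pvFalseToks

-- the bool list A's first pass produces on valid parts
def pvParse (parts : List String) : List Bool :=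
  parts.flatMap (fun p =>
    if pvTok p ∈ pvTrueToks then [true] else if pvTok p ∈ pvFalseToks then [false] else [])

theorem pv_pre_valid {raw : String} (h : Pre_bool_values_csv_py raw) :
    ∀ p ∈ pvParts raw, pvValid p := by
  intro p hp
  rcases h p hp with h1 | h2
  · exact Or.inl h1
  · simp only [List.mem_cons, List.not_mem_nil, or_false] at h2
    rcases h2 with h | h | h | h | h | h | h | h | h | h | h | h <;>
      first
        | exact Or.inr (Or.inl (by rw [h]; decide))
        | exact Or.inr (Or.inr (by rw [h]; decide))

theorem pv_true_ne_empty {t : String} (h : t ∈ pvTrueToks) : ¬ t = "" := by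
  simp only [pvTrueToks, List.mem_cons, List.not_mem_nil, or_false] at h
  rcases h with rfl | rfl | rfl | rfl | rfl | rfl <;> decide

theorem pv_false_ne_empty {t : String} (h : t ∈ pvFalseToks) : ¬ t = "" := by
  simp only [pvFalseToks, List.mem_cons, List.not_mem_nil, or_false] at h
  rcases h with rfl | rfl | rfl | rfl | rfl | rfl <;> decide

theorem pv_disjoint {t : String} (h : t ∈ pvTrueToks) : ¬ t ∈ pvFalseToks := by
  simp only [pvTrueToks, List.mem_cons, List.not_mem_nil, or_false] at h
  rcases h with rfl | rfl | rfl | rfl | rfl | rfl <;> decide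

theorem pv_parse_cons_skip {p : String} (ps : List String) (h0 : pvTok p = "") :
    pvParse (p :: ps) = pvParse ps := by
  have h1 : ¬ pvTok p ∈ pvTrueToks := by rw [h0]; decide
  have h2 : ¬ pvTok p ∈ pvFalseToks := by rw [h0]; decide
  simp [pvParse, List.flatMap_cons, h1, h2]

theorem pv_parse_cons_true {p : String} (ps : List String) (ht : pvTok p ∈ pvTrueToks) :
    pvParse (p :: ps) = true :: pvParse ps := by
  simp [pvParse, List.flatMap_cons, ht]

theorem pv_parse_cons_false {p : String} (ps : List String) (hf : pvTok p ∈ pvFalseToks) :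
    pvParse (p :: ps) = false :: pvParse ps := by
  have hnt : ¬ pvTok p ∈ pvTrueToks := fun h => pv_disjoint h hf
  simp [pvParse, List.flatMap_cons, hf, hnt]

-- A's first pass on valid parts
theorem pv_afold (parts : List String) :
    ∀ out, (∀ p ∈ parts, pvValid p) →
      parts.foldl pvAStep (some out) = some (out ++ pvParse parts) := by
  induction parts with
  | nil => intro out _; simp [pvParse]
  | cons p ps ih =>
    intro out hv
    have hps : ∀ q ∈ ps, pvValid q := fun q hq => hv q (List.mem_cons_of_mem _ hq)
    rcases hv p (List.mem_cons_self ..) with h0 | ht | hf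
    · have hst : pvAStep (some out) p = some out := by simp [pvAStep, h0]
      rw [List.foldl_cons, hst, ih out hps, pv_parse_cons_skip ps h0]
    · have hst : pvAStep (some out) p = some (out ++ [true]) := by
        simp only [pvAStep]
        rw [if_neg (pv_true_ne_empty ht), if_pos ht]
      rw [List.foldl_cons, hst, ih _ hps, pv_parse_cons_true ps ht]
      simp
    · have hst : pvAStep (some out) p = some (out ++ [false]) := by
        simp only [pvAStep]
        rw [if_neg (pv_false_ne_empty hf), if_neg (fun h => pv_disjoint h hf), if_pos hf]
      rw [List.foldl_cons, hst, ih _ hps, pv_parse_cons_false ps hf]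
      simp

-- B's validation scan passes on valid parts
theorem pv_bguard (parts : List String) (hv : ∀ p ∈ parts, pvValid p) :
    parts.any (fun p =>
      let t := pvTok p
      t ≠ "" && !(t ∈ pvTrueToks) && !(t ∈ pvFalseToks)) = false := by
  rw [List.any_eq_false]
  intro p hp
  rcases hv p hp with h | h | h <;> simp [h]

-- B's comprehension computes pvParse on valid parts
theorem pv_bvals (parts : List String) (hv : ∀ p ∈ parts, pvValid p) :
    parts.filterMap (fun p =>
      let t := pvTok p
      if t = "" then none else some (decide (t ∈ pvTrueToks))) = pvParse parts := by
  induction parts with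
  | nil => simp [pvParse]
  | cons p ps ih =>
    have hps : ∀ q ∈ ps, pvValid q := fun q hq => hv q (List.mem_cons_of_mem _ hq)
    rcases hv p (List.mem_cons_self ..) with h0 | ht | hf
    · rw [pv_parse_cons_skip ps h0, ← ih hps]
      simp [h0]
    · rw [pv_parse_cons_true ps ht, ← ih hps]
      simp [pv_true_ne_empty ht, ht]
    · rw [pv_parse_cons_false ps hf, ← ih hps]
      have hnt : ¬ pvTok p ∈ pvTrueToks := fun h => pv_disjoint h hf
      simp [pv_false_ne_empty hf, hnt]

-- once both bools are in the accumulator, A's dedupe pass is constant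
theorem pv_dedup_sat (bs : List Bool) (b : Bool) :
    bs.foldl pvDedupStep [b, !b] = [b, !b] := by
  induction bs with
  | nil => rfl
  | cons c cs ih =>
    have hc : c ∈ [b, !b] := by cases c <;> cases b <;> decide
    simp only [List.foldl_cons, pvDedupStep, if_pos hc, ih]

-- A's dedupe pass from a singleton accumulator, in closed form
theorem pv_dedup_one (bs : List Bool) (b : Bool) :
    bs.foldl pvDedupStep [b] = if (!b) ∈ bs then [b, !b] else [b] := by
  induction bs with
  | nil => simp
  | cons c cs ih =>
    by_cases hcb : c = b
    · subst hcb
      have h1 : pvDedupStep [c] c = [c] := by simp [pvDedupStep]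
      have h2 : ((!c) ∈ c :: cs) ↔ ((!c) ∈ cs) := by cases c <;> simp
      rw [List.foldl_cons, h1, ih]
      by_cases hm : (!c) ∈ cs
      · rw [if_pos hm, if_pos (h2.mpr hm)]
      · rw [if_neg hm, if_neg (fun h => hm (h2.mp h))]
    · have hcnb : c = !b := by cases c <;> cases b <;> simp_all
      subst hcnb
      have hmem : ¬ (!b) ∈ [b] := by cases b <;> decide
      have h1 : pvDedupStep [b] (!b) = [b, !b] := by simp [pvDedupStep, hmem]
      rw [List.foldl_cons, h1, pv_dedup_sat, if_pos (List.mem_cons_self ..)]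

-- ===== VERDICT =====
theorem bool_values_csv_py_spec : Claim_equal_bool_values_csv_py := by
  intro raw _ hpre
  have hv := pv_pre_valid hpre
  unfold Spec_bool_values_csv_py bool_values_csv_py bool_values_csv_py_alt
  rw [pv_afold (pvParts raw) [] hv]
  simp only [List.nil_append]
  rw [pv_bguard (pvParts raw) hv]
  simp only [Bool.false_eq_true, if_false, pv_bvals (pvParts raw) hv]
  cases hp : pvParse (pvParts raw) with
  | nil => simp
  | cons b bs =>
    rw [List.foldl_cons]
    have hstep : pvDedupStep [] b = [b] := by simp [pvDedupStep]
    rw [hstep, pv_dedup_one]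
    cases b
    · -- first value false
      rw [PySem.List.index?_cons_of_ne bs (by decide : (false : Bool) ≠ true),
          PySem.List.index?_cons_self]
      by_cases hmem : (true : Bool) ∈ bs
      · have : ∃ k, PySem.List.index? bs true = some k := by
          rcases Option.isSome_iff_exists.mp ((PySem.List.index?_isSome_iff _ _).mpr hmem) with ⟨k, hk⟩
          exact ⟨k, hk⟩
        rcases this with ⟨k, hk⟩
        rw [hk]
        simp [hmem]
      · have : PySem.List.index? bs true = none := (PySem.List.index?_eq_none_iff _ _).mpr hmem
        rw [this]
        simp [hmem]
    · -- first value true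
      rw [PySem.List.index?_cons_self,
          PySem.List.index?_cons_of_ne bs (by decide : (true : Bool) ≠ false)]
      by_cases hmem : (false : Bool) ∈ bs
      · have : ∃ k, PySem.List.index? bs false = some k := by
          rcases Option.isSome_iff_exists.mp ((PySem.List.index?_isSome_iff _ _).mpr hmem) with ⟨k, hk⟩
          exact ⟨k, hk⟩
        rcases this with ⟨k, hk⟩
        rw [hk]
        simp [hmem]
      · have : PySem.List.index? bs false = none := (PySem.List.index?_eq_none_iff _ _).mpr hmem
        rw [this]
        simp [hmem]
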